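-- pv_equiv track=rewrite | github.com/Juanp4b/Seminario-Python | practica2/src/ej9.py | limpiar
-- ===== SOURCE A (Python) =====
-- def rmEspacios(text):
--     while text.startswith(' '):
--         text = text[1:]
--     while text.endswith(' '):
--         text = text[:-1]
--     return text
--
-- def limpiar(clients):
--     out = set() # Eliminar registros duplicados para evitar clientes repetidos.
--     for client in clients:
--         if client != None:
--             clean = str(client)
--             # Eliminar espacios extra en los nombres
--             clean = rmEspacios(clean)
--             # Convertir todos los nombres a formato de título
--             clean = clean.title()
--             out.add(clean)
--
--     # Eliminar valores vacíos o nulos, ya que no aportan información válida.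
--     out = out - {'',}
--
--     return sorted(list(out))
-- ===== SOURCE B (Python) =====
-- def limpiar(clients):
--     cleaned = []
--     for client in clients:
--         if client is not None:
--             # strip(' ') removes exactly the leading/trailing spaces, like A's rmEspacios
--             cleaned.append(str(client).strip(' ').title())
--     ordenados = sorted(c for c in cleaned if c != '')
--     # sorted first, duplicates removed by adjacency in one linear pass
--     out = []
--     for c in ordenados:
--         if not out or out[-1] != c:
--             out.append(c)
--     return out
-- ===== Notes on version B (the rewrite author's own statement) =====
-- stated objective: idiomatic
-- what changed: B strips with str.strip(' ') instead of A's character-by-character while-loops, collects cleaned names in a plain list, filters '' before (not after) deduplicating, sorts first, and removes duplicates by adjacency in one linear pass instead of accumulating into a set and sorting it.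
import Mathlib
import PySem

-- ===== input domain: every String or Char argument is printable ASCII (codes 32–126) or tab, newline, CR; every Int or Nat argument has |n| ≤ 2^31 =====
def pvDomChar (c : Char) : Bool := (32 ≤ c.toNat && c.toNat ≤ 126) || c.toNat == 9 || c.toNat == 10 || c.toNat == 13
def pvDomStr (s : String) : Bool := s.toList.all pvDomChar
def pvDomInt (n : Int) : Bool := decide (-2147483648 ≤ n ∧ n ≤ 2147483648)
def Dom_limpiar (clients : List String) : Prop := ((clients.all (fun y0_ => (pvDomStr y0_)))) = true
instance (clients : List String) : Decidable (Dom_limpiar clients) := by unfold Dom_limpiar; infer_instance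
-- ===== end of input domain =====

-- B cleans into a plain list, filters '' before deduplicating, sorts first and dedupes by
-- adjacency in one pass, instead of A's set accumulation followed by sorting (idiomatic; same cost).

-- ===== PORT A =====
-- Python's str.title() is not in PySem; ported by hand, exact on the ASCII domain
-- (a char is "cased" iff it is an ASCII letter there).  Used by both ports (both Pythons call .title()).
def titleChars : Bool → List Char → List Char
  | _, [] => []
  | prevCased, c :: t =>
      (if c.isAlpha then (if prevCased then c.toLower else c.toUpper) else c) :: titleChars c.isAlpha t

def pyTitle (s : String) : String := String.ofList (titleChars false s.toList)

-- rmEspacios, first while-loop: while text.startswith(' '): text = text[1:]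
def rmLead : List Char → List Char
  | ' ' :: t => rmLead t
  | l => l

-- rmEspacios, second while-loop: while text.endswith(' '): text = text[:-1]
def rmTrail (l : List Char) : List Char :=
  if h : l.getLast? = some ' ' then rmTrail l.dropLast else l
termination_by l.length
decreasing_by
  cases l with
  | nil => simp at h
  | cons a t => simp [List.length_dropLast]

def rmEspacios (text : String) : String := String.ofList (rmTrail (rmLead text.toList))

-- A: a set accumulated in a loop, minus {''}, then sorted.  ('client != None' is always
-- true for a String argument and is dropped.)
def limpiar (clients : List String) : List String :=
  let out : PySem.Set String :=
    clients.foldl (fun s client => PySem.Set.add s (pyTitle (rmEspacios client))) PySem.Set.empty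
  let out := PySem.Set.diff out (PySem.Set.ofList [""])
  PySem.List.sorted out (fun x => x)

-- ===== PORT B =====
-- the adjacency step of B's final loop: append c unless it equals the last kept element
def dedupStep (out : List String) (c : String) : List String :=
  if out = [] ∨ ¬ (out.getLast? = some c) then out ++ [c] else out

def limpiar_alt (clients : List String) : List String :=
  let cleaned := clients.map (fun client => pyTitle (PySem.Str.stripChars client " "))
  let ordenados := PySem.List.sorted (cleaned.filter (fun c => decide (c ≠ ""))) (fun x => x)
  ordenados.foldl dedupStep []

-- ===== PRECONDITION & SPEC =====
def Spec_limpiar (clients : List String) (out : List String) : Prop := out = limpiar_alt clients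
instance (clients : List String) (out : List String) : Decidable (Spec_limpiar clients out) := by unfold Spec_limpiar; infer_instance

-- ===== CLAIM (what is proved, stated in full; the proofs are below) =====
def Claim_equal_limpiar : Prop := ∀ (clients : List String), Dom_limpiar clients → Spec_limpiar clients (limpiar clients)

-- ===== LEMMAS AND PROOFS =====

-- B's strip(' ') equals A's two while-loops
theorem rmLead_eq_dropWhile (l : List Char) : rmLead l = l.dropWhile (fun c => [' '].contains c) := by
  induction l with
  | nil => rfl
  | cons c t ih =>
    by_cases hc : c = ' '
    · subst hc; simpa [rmLead, List.dropWhile] using ih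
    · rw [rmLead.eq_def]
      cases c with
      | mk v h => simp_all [List.dropWhile]

theorem rmTrail_reverse (l : List Char) : rmTrail l.reverse = (rmLead l).reverse := by
  induction l with
  | nil => rw [rmTrail.eq_def]; rfl
  | cons c t ih =>
    rw [rmTrail.eq_def]
    by_cases hc : c = ' '
    · subst hc
      simp only [List.reverse_cons, List.getLast?_concat, List.dropLast_concat]
      rw [ih]; rfl
    · simp only [List.reverse_cons, List.getLast?_concat]
      rw [dif_neg (by simpa using hc)]
      rw [rmLead.eq_def]
      cases c with
      | mk v h => simp_all

theorem strip_eq_rmEspacios (s : String) : PySem.Str.stripChars s " " = rmEspacios s := by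
  apply String.toList_inj.mp
  rw [PySem.Str.toList_stripChars]
  show PySem.Chars.stripChars s.toList [' '] = _
  simp only [PySem.Chars.stripChars, rmEspacios, String.toList_ofList]
  rw [← rmLead_eq_dropWhile, ← rmLead_eq_dropWhile, ← List.reverse_reverse (rmLead s.toList),
    rmTrail_reverse, List.reverse_reverse]

-- the adjacency-dedup fold, rewritten as structural recursion
def goDedup (prev : String) : List String → List String
  | [] => []
  | y :: t => if y = prev then goDedup prev t else y :: goDedup y t

theorem foldl_dedup_go (s : List String) : ∀ (acc : List String) (prev : String),
    List.foldl dedupStep (acc ++ [prev]) s = acc ++ prev :: goDedup prev s := by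
  induction s with
  | nil => intro acc prev; simp [goDedup]
  | cons c t ih =>
    intro acc prev
    simp only [List.foldl, goDedup]
    by_cases hc : c = prev
    · subst hc
      simp [dedupStep, ih]
    · have hne : ¬ ((acc ++ [prev]).getLast? = some c) := by
        rw [List.getLast?_concat]
        simpa using fun e => hc (Eq.symm e)
      rw [show dedupStep (acc ++ [prev]) c = (acc ++ [prev]) ++ [c] from by
        unfold dedupStep; rw [if_pos (Or.inr hne)]]
      rw [if_neg hc, List.append_assoc]
      simpa [List.append_assoc] using ih (acc ++ [prev]) c

-- goDedup under sortedness: strictly increasing, all above prev, membership = ∈ s ∧ ≠ prev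
theorem goDedup_spec (s : List String) : ∀ (prev : String),
    (prev :: s).Pairwise (· ≤ ·) →
      (goDedup prev s).Pairwise (· < ·) ∧ (∀ a ∈ goDedup prev s, prev < a) ∧
        (∀ a, a ∈ goDedup prev s ↔ a ∈ s ∧ a ≠ prev) := by
  induction s with
  | nil => intro prev _; simp [goDedup]
  | cons y t ih =>
    intro prev h
    have hpy : prev ≤ y := (List.pairwise_cons.mp h).1 y (by simp)
    have htail : (y :: t).Pairwise (· ≤ ·) := (List.pairwise_cons.mp h).2
    by_cases hy : y = prev
    · subst hy
      obtain ⟨p1, p2, p3⟩ := ih y htail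
      refine ⟨by simpa [goDedup] using p1, ?_, ?_⟩
      · intro a ha; exact p2 a (by simpa [goDedup] using ha)
      · intro a
        simp only [goDedup, reduceIte, p3, List.mem_cons]
        constructor
        · rintro ⟨ha, hne⟩; exact ⟨Or.inr ha, hne⟩
        · rintro ⟨rfl | ha, hne⟩
          · exact absurd rfl hne
          · exact ⟨ha, hne⟩
    · obtain ⟨p1, p2, p3⟩ := ih y htail
      have hlt : prev < y := lt_of_le_of_ne hpy (fun e => hy e.symm)
      have hyt : ∀ a ∈ t, y ≤ a := (List.pairwise_cons.mp htail).1
      refine ⟨?_, ?_, ?_⟩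
      · simp only [goDedup, hy, reduceIte]
        exact List.pairwise_cons.mpr ⟨p2, p1⟩
      · intro a ha
        simp only [goDedup, hy, reduceIte, List.mem_cons] at ha
        rcases ha with rfl | ha
        · exact hlt
        · exact lt_trans hlt (p2 a ha)
      · intro a
        simp only [goDedup, hy, reduceIte, List.mem_cons, p3]
        constructor
        · rintro (rfl | ⟨ha, hne⟩)
          · exact ⟨Or.inl rfl, hy⟩
          · have hya : y ≤ a := hyt a ha
            refine ⟨Or.inr ha, ?_⟩
            intro e; subst e; exact absurd (lt_of_lt_of_le hlt hya) (lt_irrefl a)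
        · rintro ⟨rfl | ha, hne⟩
          · exact Or.inl rfl
          · by_cases hay : a = y
            · exact Or.inl hay
            · exact Or.inr ⟨ha, hay⟩

-- the whole fold on a ≤-sorted list: strictly increasing, same members
theorem dedup_fold_spec (s : List String) (h : s.Pairwise (· ≤ ·)) :
    (s.foldl dedupStep []).Pairwise (· < ·) ∧
      (∀ a, a ∈ s.foldl dedupStep [] ↔ a ∈ s) := by
  cases s with
  | nil => simp
  | cons x t =>
    have hf := foldl_dedup_go t [] x
    simp only [List.nil_append] at hf
    have hstep : dedupStep [] x = [x] := by simp [dedupStep]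
    simp only [List.foldl, hstep, hf]
    obtain ⟨p1, p2, p3⟩ := goDedup_spec t x h
    refine ⟨List.pairwise_cons.mpr ⟨p2, p1⟩, ?_⟩
    intro a
    simp only [List.mem_cons, p3]
    constructor
    · rintro (rfl | ⟨ha, _⟩)
      · exact Or.inl rfl
      · exact Or.inr ha
    · rintro (rfl | ha)
      · exact Or.inl rfl
      · by_cases hax : a = x
        · exact Or.inl hax
        · exact Or.inr ⟨ha, hax⟩

-- ===== VERDICT (by name: the statement is the Claim_ definition above) =====
theorem limpiar_spec : Claim_equal_limpiar := by
  intro clients _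
  show limpiar clients = limpiar_alt clients
  unfold limpiar limpiar_alt
  simp only [strip_eq_rmEspacios]
  set f : String → String := fun client => pyTitle (rmEspacios client) with hf
  have hfold : clients.foldl (fun s client => PySem.Set.add s (f client)) PySem.Set.empty
      = PySem.Set.ofList (clients.map f) := by
    rw [PySem.Set.ofList_eq_foldl, List.foldl_map]
    rfl
  rw [hfold]
  set L := clients.map f with hL
  set filt := L.filter (fun c => decide (c ≠ "")) with hfilt
  have hsp : (PySem.List.sorted filt (fun x => x)).Pairwise (· ≤ ·) :=
    PySem.List.sorted_pairwise filt (fun x => x)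
  obtain ⟨q1, q2⟩ := dedup_fold_spec _ hsp
  apply PySem.List.sorted_eq_of_perm_of_pairwise_lt _ _ _ _ q1
  have hnd1 : (List.foldl dedupStep [] (PySem.List.sorted filt (fun x => x))).Nodup :=
    q1.imp (fun h => ne_of_lt h)
  have hnd2 : (PySem.Set.diff (PySem.Set.ofList L) (PySem.Set.ofList [""])).Nodup :=
    PySem.Set.nodup_diff _ _ (PySem.Set.nodup_ofList L)
  rw [List.perm_ext_iff_of_nodup hnd1 hnd2]
  intro a
  rw [q2, PySem.List.mem_sorted, PySem.Set.mem_diff]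
  simp [hfilt, PySem.Set.mem_ofList, List.mem_filter]
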